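-- pv_equiv track=rewrite | github.com/Incisivosaurus/BU-2024-PROGRAMMING | BU-2024-LAB-6/is_golden_number.py | is_golden_number
-- ===== SOURCE A (Python) =====
-- def is_golden_number(n):
-- 	# Only accept positive values (anything above 0) and only accept values less than 1,000
-- 	if n <= 0 or n >= 1000:
-- 		return False
--
-- 	# If (n - 1) ^ 2 is less than 1,000, then the product of any two integers (i, j) adding up to 'n' will also
-- 	# be less than 1,000, thus not being divisible by 1,000 without a remainder
-- 	if (n - 1) ** 2 < 1000:
-- 		return False
--
-- 	# Loop over all values between 2 (inclusive) and 'n' (exclusive)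
-- 	# We can start at 2 instead of 1 because 1 will never multiply to a number divisible by 1,000 as 'n' can only ever be less than 1,000
-- 	for i in range(2, n):
-- 		# There's no reason to loop over 'n' again, so we may as well limit it to the value 'i' is at (inclusively by adding +1).
-- 		for j in range(2, i + 1):
-- 			# If 'i' and 'j' equal exactly 'n' and can be cleanly divided by 1,000 without a remainder, return True
-- 			if i + j == n and i * j % 1000 == 0:
-- 				return True
--
-- 	return False
-- ===== SOURCE B (Python) =====
-- def is_golden_number(n):
--     if n <= 0 or n >= 1000:
--         return False
--     # single pass: for each i, its partner is j = n - i; both must be >= 2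
--     for i in range(2, n - 1):
--         if i * (n - i) % 1000 == 0:
--             return True
--     return False
-- ===== Notes on version B (the rewrite author's own statement) =====
-- stated objective: faster
-- what changed: Replaced the nested scan over all pairs (i,j) by a single loop over i with the partner computed as j=n-i, removing the inner loop.
import Mathlib
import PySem

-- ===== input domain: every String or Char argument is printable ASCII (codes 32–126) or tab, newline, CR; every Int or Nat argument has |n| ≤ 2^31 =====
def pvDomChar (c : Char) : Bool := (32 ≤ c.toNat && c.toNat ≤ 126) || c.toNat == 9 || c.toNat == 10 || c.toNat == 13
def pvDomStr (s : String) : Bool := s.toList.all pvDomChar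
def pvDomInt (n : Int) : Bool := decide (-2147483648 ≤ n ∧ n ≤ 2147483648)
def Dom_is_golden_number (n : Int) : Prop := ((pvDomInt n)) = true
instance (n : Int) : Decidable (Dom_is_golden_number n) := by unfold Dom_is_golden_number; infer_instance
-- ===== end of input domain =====

-- B replaces A's nested pair scan by a single loop computing the partner j = n - i (O(n) vs O(n^2)).

-- ===== PORT A =====
def is_golden_number (n : Int) : Bool :=
  if n ≤ 0 ∨ n ≥ 1000 then false
  else if (n - 1) ^ 2 < 1000 then false
  else
    (PySem.List.pyRange 2 n 1).any (fun i =>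
      (PySem.List.pyRange 2 (i + 1) 1).any (fun j =>
        decide (i + j = n) && decide (PySem.Int.mod (i * j) 1000 = 0)))

-- ===== PORT B =====
def is_golden_number_alt (n : Int) : Bool :=
  if n ≤ 0 ∨ n ≥ 1000 then false
  else
    (PySem.List.pyRange 2 (n - 1) 1).any (fun i =>
      decide (PySem.Int.mod (i * (n - i)) 1000 = 0))

-- ===== PRECONDITION & SPEC =====
def Spec_is_golden_number (n : Int) (out : Bool) : Prop := out = is_golden_number_alt n
instance (n : Int) (out : Bool) : Decidable (Spec_is_golden_number n out) := by unfold Spec_is_golden_number; infer_instance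

-- ===== CLAIM (what is proved, stated in full; the proofs are below) =====
def Claim_equal_is_golden_number : Prop := ∀ (n : Int), Dom_is_golden_number n → Spec_is_golden_number n (is_golden_number n)

-- ===== LEMMAS AND PROOFS =====

-- B finds nothing when (n-1)^2 < 1000 (then any admissible product lies in [4,256])
lemma alt_small_false (n : Int) (h0 : ¬ (n ≤ 0 ∨ n ≥ 1000)) (hs : (n - 1) ^ 2 < 1000) :
    is_golden_number_alt n = false := by
  unfold is_golden_number_alt
  rw [if_neg h0]
  simp only [List.any_eq_false, PySem.List.mem_pyRange_one]
  rintro i ⟨h2, hlt⟩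
  have hn : n ≤ 32 := by nlinarith
  have hj : (2 : Int) ≤ n - i := by omega
  have hub : i * (n - i) ≤ 256 := by nlinarith [sq_nonneg (n - 2*i)]
  have hlb : (4 : Int) ≤ i * (n - i) := by nlinarith
  have : PySem.Int.mod (i * (n - i)) 1000 = i * (n - i) % 1000 :=
    PySem.Int.mod_eq_emod_of_pos (by norm_num)
  simp only [this, decide_eq_true_eq]
  rw [Int.emod_eq_of_lt (by omega) (by omega)]
  omega

lemma any_iff (n : Int) :
    ((PySem.List.pyRange 2 n 1).any (fun i =>
      (PySem.List.pyRange 2 (i + 1) 1).any (fun j =>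
        decide (i + j = n) && decide (PySem.Int.mod (i * j) 1000 = 0)))) =
    ((PySem.List.pyRange 2 (n - 1) 1).any (fun i =>
      decide (PySem.Int.mod (i * (n - i)) 1000 = 0))) := by
  rw [Bool.eq_iff_iff]
  simp only [List.any_eq_true, PySem.List.mem_pyRange_one, Bool.and_eq_true, decide_eq_true_eq]
  constructor
  · rintro ⟨i, ⟨h2i, hin⟩, j, ⟨h2j, hji⟩, heq, hmod⟩
    refine ⟨i, ⟨h2i, by omega⟩, ?_⟩
    have : n - i = j := by omega
    rw [this]; exact hmod
  · rintro ⟨i, ⟨h2i, hin⟩, hmod⟩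
    by_cases h : n - i ≤ i
    · exact ⟨i, ⟨h2i, by omega⟩, n - i, ⟨by omega, by omega⟩, by omega, hmod⟩
    · refine ⟨n - i, ⟨by omega, by omega⟩, i, ⟨h2i, by omega⟩, by omega, ?_⟩
      rw [mul_comm]; exact hmod

-- ===== VERDICT (by name: the statement is the Claim_ definition above) =====
theorem is_golden_number_spec : Claim_equal_is_golden_number := by
  intro n _
  unfold Spec_is_golden_number is_golden_number
  by_cases h0 : n ≤ 0 ∨ n ≥ 1000
  · rw [if_pos h0]
    unfold is_golden_number_alt
    rw [if_pos h0]
  · rw [if_neg h0]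
    by_cases hs : (n - 1) ^ 2 < 1000
    · rw [if_pos hs, alt_small_false n h0 hs]
    · rw [if_neg hs]
      conv_rhs => rw [is_golden_number_alt, if_neg h0]
      exact any_iff n
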